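-- pv_equiv track=rewrite | github.com/lottaLappalainen/Github-issue-classifier | src/data/clean.py | assign_priority
-- ===== SOURCE A (Python) =====
-- LABEL_MAP = {
--     "high": [
--         "bug", "critical", "priority:high", "severity:high",
--         "Priority: High", "type: bug", "kind/bug",
--     ],
--     "medium": [
--         "enhancement", "feature", "priority:medium",
--         "Priority: Medium", "type: enhancement", "kind/feature",
--     ],
--     "low": [
--         "documentation", "good first issue", "priority:low",
--         "Priority: Low", "help wanted", "type: documentation",
--     ],
-- }
--
-- PRIORITY_ORDER = {"high": 0, "medium": 1, "low": 2}
--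
-- def assign_priority(labels: list[dict]) -> str | None:
--     """
--     Given a list of GitHub label objects, return the highest priority class.
--     Returns None if no relevant label is found.
--     """
--     label_names = [l["name"].lower() for l in labels]
--     assigned = []
--
--     for priority, keywords in LABEL_MAP.items():
--         if any(k.lower() in label_names for k in keywords):
--             assigned.append(priority)
--
--     if not assigned:
--         return None
--
--     # Return the highest priority found
--     return min(assigned, key=lambda p: PRIORITY_ORDER[p])
-- ===== SOURCE B (Python) =====
-- LABEL_MAP = {
--     "high": [
--         "bug", "critical", "priority:high", "severity:high",
--         "Priority: High", "type: bug", "kind/bug",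
--     ],
--     "medium": [
--         "enhancement", "feature", "priority:medium",
--         "Priority: Medium", "type: enhancement", "kind/feature",
--     ],
--     "low": [
--         "documentation", "good first issue", "priority:low",
--         "Priority: Low", "help wanted", "type: documentation",
--     ],
-- }
--
-- PRIORITY_ORDER = {"high": 0, "medium": 1, "low": 2}
--
-- # keyword (lowercased) -> priority class, built once
-- INVERTED = {k.lower(): prio for prio, keywords in LABEL_MAP.items() for k in keywords}
--
-- def assign_priority(labels: list[dict]) -> str | None:
--     """Single pass over the labels, tracking the best (smallest-rank) priority."""
--     best = None  # (rank, priority) of the best match so far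
--     for l in labels:
--         prio = INVERTED.get(l["name"].lower())
--         if prio is not None:
--             rank = PRIORITY_ORDER[prio]
--             if best is None or rank < best[0]:
--                 best = (rank, prio)
--     return best[1] if best is not None else None
-- ===== Notes on version B (the rewrite author's own statement) =====
-- stated objective: idiomatic
-- what changed: B precomputes one inverted dict keyword->class and makes a single pass over the labels tracking the minimal-rank match, instead of A's building the lowered-name list and scanning it once per category keyword.
import Mathlib
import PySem

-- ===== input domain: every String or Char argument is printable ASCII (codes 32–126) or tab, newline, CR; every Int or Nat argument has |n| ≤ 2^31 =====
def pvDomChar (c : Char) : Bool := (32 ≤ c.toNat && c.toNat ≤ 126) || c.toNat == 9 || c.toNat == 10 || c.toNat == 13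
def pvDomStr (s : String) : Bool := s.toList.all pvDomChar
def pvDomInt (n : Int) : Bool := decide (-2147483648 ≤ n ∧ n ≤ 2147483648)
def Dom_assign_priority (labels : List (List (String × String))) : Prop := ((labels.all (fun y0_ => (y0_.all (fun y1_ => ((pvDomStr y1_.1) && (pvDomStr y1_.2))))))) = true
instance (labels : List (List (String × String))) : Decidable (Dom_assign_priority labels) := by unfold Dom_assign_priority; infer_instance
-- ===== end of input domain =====

-- ===== PORT A =====
-- B builds an inverted keyword-to-class dict once and scans the labels in one pass,
-- instead of A's per-category keyword scans over the label-name list; return values agree.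
def pvLABEL_MAP : List (String × List String) :=
  [("high", ["bug", "critical", "priority:high", "severity:high",
             "Priority: High", "type: bug", "kind/bug"]),
   ("medium", ["enhancement", "feature", "priority:medium",
               "Priority: Medium", "type: enhancement", "kind/feature"]),
   ("low", ["documentation", "good first issue", "priority:low",
            "Priority: Low", "help wanted", "type: documentation"])]

def pvPRIORITY_ORDER : PySem.Dict String Int :=
  PySem.Dict.mk [("high", 0), ("medium", 1), ("low", 2)]

def assign_priority (labels : List (List (String × String))) : Option String :=
  let label_names := labels.map (fun l => PySem.Str.lower (((PySem.Dict.mk l).get? "name").getD ""))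
  let assigned := pvLABEL_MAP.foldl
    (fun acc pk => if pk.2.any (fun k => label_names.contains (PySem.Str.lower k))
                   then acc ++ [pk.1] else acc) []
  if assigned.isEmpty then none
  else PySem.List.min? assigned (fun p => pvPRIORITY_ORDER.getD p 0)

-- ===== PORT B =====
def pvINVERTED : PySem.Dict String String :=
  pvLABEL_MAP.foldl
    (fun d pk => pk.2.foldl (fun d k => d.insert (PySem.Str.lower k) pk.1) d)
    PySem.Dict.empty

def assign_priority_alt (labels : List (List (String × String))) : Option String :=
  let best := labels.foldl
    (fun best l =>
      match pvINVERTED.get? (PySem.Str.lower (((PySem.Dict.mk l).get? "name").getD "")) with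
      | none => best
      | some prio =>
        let rank := pvPRIORITY_ORDER.getD prio 0
        match best with
        | none => some (rank, prio)
        | some b => if rank < b.1 then some (rank, prio) else some b)
    none
  match best with
  | some b => some b.2
  | none => none

-- ===== PRECONDITION & SPEC =====
-- Pre_ excludes exactly the inputs on which Python A raises KeyError: a label dict without a "name" key.
def Pre_assign_priority (labels : List (List (String × String))) : Prop :=
  labels.all (fun l => (PySem.Dict.mk l).contains "name") = true
instance (labels : List (List (String × String))) : Decidable (Pre_assign_priority labels) := by
  unfold Pre_assign_priority; infer_instance
def pvWitness_assign_priority : (List (List (String × String))) := [[("name", "Bug")], [("name", "feature")]]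

def Spec_assign_priority (labels : List (List (String × String))) (out : Option String) : Prop := out = assign_priority_alt labels
instance (labels : List (List (String × String))) (out : Option String) : Decidable (Spec_assign_priority labels out) := by unfold Spec_assign_priority; infer_instance

-- ===== CLAIM (what is proved, stated in full; the proofs are below) =====
def Claim_equal_assign_priority : Prop := ∀ (labels : List (List (String × String))), Dom_assign_priority labels → Pre_assign_priority labels → Spec_assign_priority labels (assign_priority labels)

-- ===== LEMMAS AND PROOFS =====

-- the lowercased keyword lists of the three priority classes
def pvHI : List String := ["bug", "critical", "priority:high", "severity:high",
                           "priority: high", "type: bug", "kind/bug"]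
def pvMED : List String := ["enhancement", "feature", "priority:medium",
                            "priority: medium", "type: enhancement", "kind/feature"]
def pvLO : List String := ["documentation", "good first issue", "priority:low",
                           "priority: low", "help wanted", "type: documentation"]

-- the lowercased name B looks up for a label
def pvName (l : List (String × String)) : String :=
  PySem.Str.lower (((PySem.Dict.mk l).get? "name").getD "")

-- (rank, class) assigned to one lowercased name by B's table lookup
def pvClassify (n : String) : Option (Int × String) :=
  match pvINVERTED.get? n with
  | none => none
  | some p => some (pvPRIORITY_ORDER.getD p 0, p)

-- B's accumulator update: keep the smaller rank, the incumbent on ties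
def pvMerge (a b : Option (Int × String)) : Option (Int × String) :=
  match a, b with
  | none, b => b
  | some x, none => some x
  | some x, some y => if y.1 < x.1 then some y else some x

def pvBest (ns : List String) : Option (Int × String) :=
  ns.foldl (fun b n => pvMerge b (pvClassify n)) none

theorem pvMerge_none_left (a : Option (Int × String)) : pvMerge none a = a := by
  cases a <;> rfl

theorem pvMerge_assoc (a b c : Option (Int × String)) :
    pvMerge (pvMerge a b) c = pvMerge a (pvMerge b c) := by
  rcases a with _ | x
  · rw [pvMerge_none_left, pvMerge_none_left]
  rcases b with _ | y
  · rw [pvMerge_none_left]; rfl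
  rcases c with _ | z
  · by_cases h1 : y.1 < x.1 <;> simp [pvMerge, h1]
  · by_cases h1 : y.1 < x.1 <;> by_cases h2 : z.1 < y.1 <;> by_cases h3 : z.1 < x.1 <;>
      simp [pvMerge, h1, h2, h3] <;> omega

theorem pvBest_merge (ns : List String) (acc : Option (Int × String)) :
    ns.foldl (fun b n => pvMerge b (pvClassify n)) acc = pvMerge acc (pvBest ns) := by
  induction ns generalizing acc with
  | nil =>
    rw [List.foldl_nil]
    show acc = pvMerge acc (List.foldl _ none [])
    rw [List.foldl_nil]
    cases acc <;> rfl
  | cons n t ih =>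
    rw [List.foldl_cons]
    show List.foldl _ (pvMerge acc (pvClassify n)) t = pvMerge acc (pvBest (n :: t))
    rw [ih]
    have hb : pvBest (n :: t) = pvMerge (pvClassify n) (pvBest t) := by
      show List.foldl _ (pvMerge none (pvClassify n)) t = _
      rw [pvMerge_none_left, ih]
    rw [hb, pvMerge_assoc]

theorem pvBest_cons (n : String) (t : List String) :
    pvBest (n :: t) = pvMerge (pvClassify n) (pvBest t) := by
  show List.foldl _ (pvMerge none (pvClassify n)) t = _
  rw [pvMerge_none_left, pvBest_merge]

theorem pvINVERTED_eq : pvINVERTED = PySem.Dict.mk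
    [("bug","high"),("critical","high"),("priority:high","high"),("severity:high","high"),
     ("priority: high","high"),("type: bug","high"),("kind/bug","high"),
     ("enhancement","medium"),("feature","medium"),("priority:medium","medium"),
     ("priority: medium","medium"),("type: enhancement","medium"),("kind/feature","medium"),
     ("documentation","low"),("good first issue","low"),("priority:low","low"),
     ("priority: low","low"),("help wanted","low"),("type: documentation","low")] := by
  decide

theorem pvClassify_eq (n : String) :
    pvClassify n = if pvHI.contains n then some (0, "high")
                   else if pvMED.contains n then some (1, "medium")
                   else if pvLO.contains n then some (2, "low")
                   else none := by
  unfold pvClassify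
  rw [pvINVERTED_eq]
  by_cases h0 : n = "bug"
  · subst h0; decide
  by_cases h1 : n = "critical"
  · subst h1; decide
  by_cases h2 : n = "priority:high"
  · subst h2; decide
  by_cases h3 : n = "severity:high"
  · subst h3; decide
  by_cases h4 : n = "priority: high"
  · subst h4; decide
  by_cases h5 : n = "type: bug"
  · subst h5; decide
  by_cases h6 : n = "kind/bug"
  · subst h6; decide
  by_cases h7 : n = "enhancement"
  · subst h7; decide
  by_cases h8 : n = "feature"
  · subst h8; decide
  by_cases h9 : n = "priority:medium"
  · subst h9; decide
  by_cases h10 : n = "priority: medium"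
  · subst h10; decide
  by_cases h11 : n = "type: enhancement"
  · subst h11; decide
  by_cases h12 : n = "kind/feature"
  · subst h12; decide
  by_cases h13 : n = "documentation"
  · subst h13; decide
  by_cases h14 : n = "good first issue"
  · subst h14; decide
  by_cases h15 : n = "priority:low"
  · subst h15; decide
  by_cases h16 : n = "priority: low"
  · subst h16; decide
  by_cases h17 : n = "help wanted"
  · subst h17; decide
  by_cases h18 : n = "type: documentation"
  · subst h18; decide
  simp [PySem.Dict.get?, pvHI, pvMED, pvLO, beq_iff_eq,
    Ne.symm h0, Ne.symm h1, Ne.symm h2, Ne.symm h3, Ne.symm h4, Ne.symm h5, Ne.symm h6, Ne.symm h7, Ne.symm h8, Ne.symm h9, Ne.symm h10, Ne.symm h11, Ne.symm h12, Ne.symm h13, Ne.symm h14, Ne.symm h15, Ne.symm h16, Ne.symm h17, Ne.symm h18,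
    h0, h1, h2, h3, h4, h5, h6, h7, h8, h9, h10, h11, h12, h13, h14, h15, h16, h17, h18]

theorem pvBest_char (ns : List String) :
    pvBest ns = if ns.any (fun n => pvHI.contains n) then some (0, "high")
                else if ns.any (fun n => pvMED.contains n) then some (1, "medium")
                else if ns.any (fun n => pvLO.contains n) then some (2, "low")
                else none := by
  induction ns with
  | nil => rfl
  | cons n t ih =>
    rw [pvBest_cons, pvClassify_eq, ih]
    simp only [List.any_cons]
    by_cases hh : pvHI.contains n = true <;> by_cases hm : pvMED.contains n = true <;>
      by_cases hl : pvLO.contains n = true <;>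
      by_cases H : t.any (fun n => pvHI.contains n) = true <;>
      by_cases M : t.any (fun n => pvMED.contains n) = true <;>
      by_cases L : t.any (fun n => pvLO.contains n) = true <;>
      simp only [Bool.not_eq_true] at hh hm hl H M L <;>
      simp only [hh, hm, hl, H, M, L] <;> decide

theorem any_contains_swap (K : List String) (g : String → String) (ln : List String) :
    K.any (fun k => ln.contains (g k)) = ln.any (fun n => (K.map g).contains n) := by
  rw [Bool.eq_iff_iff]
  simp only [List.any_eq_true, List.contains_iff_mem, List.mem_map]
  constructor
  · rintro ⟨k, hk, hg⟩; exact ⟨g k, hg, k, hk, rfl⟩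
  · rintro ⟨x, hx, k, hk, rfl⟩; exact ⟨k, hk, hx⟩

theorem pvMain (ln : List String) :
    (if (pvLABEL_MAP.foldl
          (fun acc pk => if pk.2.any (fun k => ln.contains (PySem.Str.lower k))
                         then acc ++ [pk.1] else acc) []).isEmpty
     then none
     else PySem.List.min?
            (pvLABEL_MAP.foldl
              (fun acc pk => if pk.2.any (fun k => ln.contains (PySem.Str.lower k))
                             then acc ++ [pk.1] else acc) [])
            (fun p => pvPRIORITY_ORDER.getD p 0))
    = (match pvBest ln with
       | some b => some b.2
       | none => none) := by
  rw [pvBest_char]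
  simp only [pvLABEL_MAP, List.foldl_cons, List.foldl_nil]
  have e1 : (["bug", "critical", "priority:high", "severity:high",
              "Priority: High", "type: bug", "kind/bug"].any
               (fun k => ln.contains (PySem.Str.lower k)))
          = ln.any (fun n => pvHI.contains n) := by
    rw [any_contains_swap, show (["bug", "critical", "priority:high", "severity:high",
        "Priority: High", "type: bug", "kind/bug"].map PySem.Str.lower) = pvHI from by decide]
  have e2 : (["enhancement", "feature", "priority:medium",
              "Priority: Medium", "type: enhancement", "kind/feature"].any
               (fun k => ln.contains (PySem.Str.lower k)))
          = ln.any (fun n => pvMED.contains n) := by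
    rw [any_contains_swap, show (["enhancement", "feature", "priority:medium",
        "Priority: Medium", "type: enhancement", "kind/feature"].map PySem.Str.lower) = pvMED from by decide]
  have e3 : (["documentation", "good first issue", "priority:low",
              "Priority: Low", "help wanted", "type: documentation"].any
               (fun k => ln.contains (PySem.Str.lower k)))
          = ln.any (fun n => pvLO.contains n) := by
    rw [any_contains_swap, show (["documentation", "good first issue", "priority:low",
        "Priority: Low", "help wanted", "type: documentation"].map PySem.Str.lower) = pvLO from by decide]
  rw [e1, e2, e3]
  by_cases H : ln.any (fun n => pvHI.contains n) = true <;>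
    by_cases M : ln.any (fun n => pvMED.contains n) = true <;>
    by_cases L : ln.any (fun n => pvLO.contains n) = true <;>
    simp only [Bool.not_eq_true] at H M L <;>
    simp only [H, M, L] <;> decide

theorem pvFoldB (labels : List (List (String × String))) (acc : Option (Int × String)) :
    labels.foldl (fun best l => pvMerge best (pvClassify (pvName l))) acc
    = (labels.map pvName).foldl (fun b n => pvMerge b (pvClassify n)) acc := by
  induction labels generalizing acc with
  | nil => rfl
  | cons l t ih => simp only [List.foldl_cons, List.map_cons, ih]

theorem pvStep (best : Option (Int × String)) (l : List (String × String)) :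
    (match pvINVERTED.get? (PySem.Str.lower (((PySem.Dict.mk l).get? "name").getD "")) with
     | none => best
     | some prio =>
       let rank := pvPRIORITY_ORDER.getD prio 0
       match best with
       | none => some (rank, prio)
       | some b => if rank < b.1 then some (rank, prio) else some b)
    = pvMerge best (pvClassify (pvName l)) := by
  unfold pvClassify pvName
  cases pvINVERTED.get? (PySem.Str.lower (((PySem.Dict.mk l).get? "name").getD "")) <;>
    cases best <;> rfl

-- ===== VERDICT (by name: the statement is the Claim_ definition above) =====
theorem assign_priority_spec : Claim_equal_assign_priority := by
  intro labels _ _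
  unfold Spec_assign_priority assign_priority assign_priority_alt
  rw [show (fun (best : Option (Int × String)) (l : List (String × String)) =>
        (match pvINVERTED.get? (PySem.Str.lower (((PySem.Dict.mk l).get? "name").getD "")) with
         | none => best
         | some prio =>
           let rank := pvPRIORITY_ORDER.getD prio 0
           match best with
           | none => some (rank, prio)
           | some b => if rank < b.1 then some (rank, prio) else some b))
      = fun best l => pvMerge best (pvClassify (pvName l)) from
        funext fun best => funext fun l => pvStep best l]
  rw [pvFoldB]
  exact pvMain (labels.map pvName)
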